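-- pv_equiv track=rewrite | github.com/Kellemensch/study-correlation | igra_ducts.py | detect_duct_zones
-- ===== SOURCE A (Python) =====
-- DUCT_THRESHOLD = -157
--
-- def detect_duct_zones(gradients, threshold = DUCT_THRESHOLD):
--     duct_zones = []
--     current_duct = None
--
--     for h, g in gradients:
--         if g < threshold:
--             if current_duct is None:
--                 # Start new duct zone
--                 current_duct = {
--                     'base_height': h,
--                     'top_height': h,
--                     'min_gradient': g,
--                     'min_gradient_height': h
--                 }
--             else:
--                 # Extend existing duct zone
--                 current_duct['top_height'] = h
--                 if g < current_duct['min_gradient']: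
--                     current_duct['min_gradient'] = g
--                     current_duct['min_gradient_height'] = h
--         else:
--             if current_duct is not None:
--                 # Finalize current duct zone
--                 current_duct['thickness'] = current_duct['top_height'] - current_duct['base_height']
--                 duct_zones.append(current_duct)
--                 current_duct = None
--
--     # Add last duct if file ends with duct
--     if current_duct is not None:
--         current_duct['thickness'] = current_duct['top_height'] - current_duct['base_height']
--         duct_zones.append(current_duct)
--
--     return duct_zones
-- ===== SOURCE B (Python) =====
-- DUCT_THRESHOLD = -157
--
-- def detect_duct_zones(gradients, threshold=DUCT_THRESHOLD):
--     # Phase 1: group consecutive points into runs by their below-threshold flag.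
--     runs = []
--     for hg in gradients:
--         flag = hg[1] < threshold
--         if runs and runs[-1][0] == flag:
--             runs[-1][1].append(hg)
--         else:
--             runs.append((flag, [hg]))
--     # Phase 2: summarize each below-threshold run into a duct-zone dict.
--     zones = []
--     for flag, run in runs:
--         if flag:
--             base = run[0][0]
--             top = run[-1][0]
--             mh, mg = min(run, key=lambda p: p[1])
--             zones.append({
--                 'base_height': base,
--                 'top_height': top,
--                 'min_gradient': mg,
--                 'min_gradient_height': mh,
--                 'thickness': top - base,
--             })
--     return zones
-- ===== Notes on version B (the rewrite author's own statement) =====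
-- stated objective: alternative
-- what changed: Replaces A's incremental start/extend/finalize state machine over an optional current-duct dict with a two-phase pass: first group consecutive points into runs by their below-threshold flag, then summarize each below-threshold run (first/last height, first minimum gradient) into a zone dict.
import Mathlib
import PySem

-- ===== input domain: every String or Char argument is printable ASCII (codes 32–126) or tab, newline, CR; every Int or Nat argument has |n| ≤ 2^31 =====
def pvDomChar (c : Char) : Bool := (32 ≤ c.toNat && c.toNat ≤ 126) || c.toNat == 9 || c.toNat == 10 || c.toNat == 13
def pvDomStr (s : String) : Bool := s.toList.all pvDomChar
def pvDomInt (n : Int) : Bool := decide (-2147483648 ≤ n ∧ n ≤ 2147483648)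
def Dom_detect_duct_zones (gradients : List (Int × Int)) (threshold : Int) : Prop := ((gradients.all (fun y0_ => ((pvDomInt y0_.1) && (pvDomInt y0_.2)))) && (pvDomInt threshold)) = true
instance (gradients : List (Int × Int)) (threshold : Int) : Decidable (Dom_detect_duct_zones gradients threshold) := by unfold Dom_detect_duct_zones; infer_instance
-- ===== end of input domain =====

-- B replaces A's start/extend/finalize state machine with a group-into-runs-then-summarize
-- two-phase pass (alternative decomposition, same O(n) cost); return values proved equal on all inputs.

-- ===== PORT A =====
-- A's loop state: (duct_zones, current_duct); current_duct is a Python dict → PySem.Dict.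
def pvAStep (threshold : Int) (st : List (List (String × Int)) × Option (PySem.Dict String Int))
    (p : Int × Int) : List (List (String × Int)) × Option (PySem.Dict String Int) :=
  if p.2 < threshold then
    match st.2 with
    | none =>
        (st.1, some (PySem.Dict.ofList
          [("base_height", p.1), ("top_height", p.1), ("min_gradient", p.2), ("min_gradient_height", p.1)]))
    | some d =>
        let d1 := d.insert "top_height" p.1
        let d2 := if p.2 < d1.getD "min_gradient" 0
                  then (d1.insert "min_gradient" p.2).insert "min_gradient_height" p.1
                  else d1
        (st.1, some d2)
  else
    match st.2 with
    | none => st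
    | some d =>
        (st.1 ++ [(d.insert "thickness" (d.getD "top_height" 0 - d.getD "base_height" 0)).items], none)

-- the trailing "add last duct" block
def pvAFinish (st : List (List (String × Int)) × Option (PySem.Dict String Int)) :
    List (List (String × Int)) :=
  match st.2 with
  | none => st.1
  | some d => st.1 ++ [(d.insert "thickness" (d.getD "top_height" 0 - d.getD "base_height" 0)).items]

def detect_duct_zones (gradients : List (Int × Int)) (threshold : Int) : List (List (String × Int)) :=
  pvAFinish (gradients.foldl (pvAStep threshold) ([], none))

-- ===== PORT B =====
-- phase 1: append each point to the last run if its flag matches, else open a new run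
def pvRunsStep (threshold : Int) (runs : List (Bool × List (Int × Int))) (hg : Int × Int) :
    List (Bool × List (Int × Int)) :=
  let flag := decide (hg.2 < threshold)
  match runs.getLast? with
  | some last => if last.1 = flag then runs.dropLast ++ [(flag, last.2 ++ [hg])]
                 else runs ++ [(flag, [hg])]
  | none => [(flag, [hg])]

-- phase 2: summarize one below-threshold run into the zone dict (run is always nonempty in B)
def pvZoneOf (run : List (Int × Int)) : List (String × Int) :=
  match run.head?, run.getLast?, PySem.List.min? run (fun p => p.2) with
  | some b, some t, some m =>
      [("base_height", b.1), ("top_height", t.1), ("min_gradient", m.2),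
       ("min_gradient_height", m.1), ("thickness", t.1 - b.1)]
  | _, _, _ => []

def detect_duct_zones_alt (gradients : List (Int × Int)) (threshold : Int) : List (List (String × Int)) :=
  (gradients.foldl (pvRunsStep threshold) []).foldl
    (fun zones fr => if fr.1 then zones ++ [pvZoneOf fr.2] else zones) []

-- ===== PRECONDITION & SPEC =====
def Spec_detect_duct_zones (gradients : List (Int × Int)) (threshold : Int) (out : List (List (String × Int))) : Prop := out = detect_duct_zones_alt gradients threshold
instance (gradients : List (Int × Int)) (threshold : Int) (out : List (List (String × Int))) : Decidable (Spec_detect_duct_zones gradients threshold out) := by unfold Spec_detect_duct_zones; infer_instance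

-- ===== CLAIM (what is proved, stated in full; the proofs are below) =====
def Claim_equal_detect_duct_zones : Prop := ∀ (gradients : List (Int × Int)) (threshold : Int), Dom_detect_duct_zones gradients threshold → Spec_detect_duct_zones gradients threshold (detect_duct_zones gradients threshold)

-- ===== LEMMAS AND PROOFS =====

-- the only dict shape A's current_duct ever takes
def pvMkCur (b t m mh : Int) : PySem.Dict String Int :=
  PySem.Dict.ofList
    [("base_height", b), ("top_height", t), ("min_gradient", m), ("min_gradient_height", mh)]

theorem pvMkCur_insert_top (b t m mh h : Int) :
    (pvMkCur b t m mh).insert "top_height" h = pvMkCur b h m mh := rfl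

theorem pvMkCur_getD_min (b t m mh : Int) :
    (pvMkCur b t m mh).getD "min_gradient" 0 = m := rfl

theorem pvMkCur_getD_top (b t m mh : Int) :
    (pvMkCur b t m mh).getD "top_height" 0 = t := rfl

theorem pvMkCur_getD_base (b t m mh : Int) :
    (pvMkCur b t m mh).getD "base_height" 0 = b := rfl

theorem pvMkCur_insert_min (b t m mh g h : Int) :
    ((pvMkCur b t m mh).insert "min_gradient" g).insert "min_gradient_height" h
      = pvMkCur b t g h := rfl

theorem pvMkCur_items_thickness (b t m mh x : Int) :
    ((pvMkCur b t m mh).insert "thickness" x).items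
      = [("base_height", b), ("top_height", t), ("min_gradient", m),
         ("min_gradient_height", mh), ("thickness", x)] := rfl

-- B's phase-2 result as filter+map
def pvZonesOf (runs : List (Bool × List (Int × Int))) : List (List (String × Int)) :=
  (runs.filter (fun r => r.1)).map (fun r => pvZoneOf r.2)

theorem pvZonesOf_concat (rs : List (Bool × List (Int × Int))) (x : Bool × List (Int × Int)) :
    pvZonesOf (rs ++ [x]) = pvZonesOf rs ++ if x.1 then [pvZoneOf x.2] else [] := by
  cases hx : x.1 <;> simp [pvZonesOf, List.filter_append, hx]

theorem pvMin_concat_some (xs : List (Int × Int)) (x m : Int × Int)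
    (h : PySem.List.min? xs (fun p => p.2) = some m) :
    PySem.List.min? (xs ++ [x]) (fun p => p.2)
      = if x.2 < m.2 then some x else some m := by
  simp only [PySem.List.min?] at h ⊢
  rw [List.foldl_append, h]
  simp

-- invariant relating A's loop state to B's runs-so-far
def pvInv (runs : List (Bool × List (Int × Int)))
    (st : List (List (String × Int)) × Option (PySem.Dict String Int)) : Prop :=
  match st.2 with
  | none => pvZonesOf runs = st.1 ∧ (runs = [] ∨ ∃ rs run, runs = rs ++ [(false, run)])
  | some d => ∃ rs run b t m mh p q, runs = rs ++ [(true, run)] ∧ pvZonesOf rs = st.1 ∧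
      d = pvMkCur b t m mh ∧ run.head? = some (b, p) ∧ run.getLast? = some (t, q) ∧
      PySem.List.min? run (fun x => x.2) = some (mh, m)

theorem pvZoneOf_of_inv {run : List (Int × Int)} {b t m mh p q : Int}
    (h1 : run.head? = some (b, p)) (h2 : run.getLast? = some (t, q))
    (h3 : PySem.List.min? run (fun x => x.2) = some (mh, m)) :
    pvZoneOf run = [("base_height", b), ("top_height", t), ("min_gradient", m),
                    ("min_gradient_height", mh), ("thickness", t - b)] := by
  simp [pvZoneOf, h1, h2, h3]

theorem pvFinish_inv (runs : List (Bool × List (Int × Int)))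
    (st : List (List (String × Int)) × Option (PySem.Dict String Int)) (h : pvInv runs st) :
    pvAFinish st = pvZonesOf runs := by
  obtain ⟨zs, cur⟩ := st
  cases cur with
  | none => exact h.1.symm
  | some d =>
      obtain ⟨rs, run, b, t, m, mh, p, q, hruns, hzs, hd, h1, h2, h3⟩ := h
      subst hruns hd
      simp only [pvAFinish, pvMkCur_getD_top, pvMkCur_getD_base, pvMkCur_items_thickness,
        pvZonesOf_concat, pvZoneOf_of_inv h1 h2 h3]
      simp [hzs]

theorem pvStep_inv (threshold : Int) (runs : List (Bool × List (Int × Int)))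
    (st : List (List (String × Int)) × Option (PySem.Dict String Int)) (hg : Int × Int)
    (h : pvInv runs st) : pvInv (pvRunsStep threshold runs hg) (pvAStep threshold st hg) := by
  obtain ⟨zs, cur⟩ := st
  obtain ⟨hh, g⟩ := hg
  cases cur with
  | some d =>
      obtain ⟨rs, run, b, t, m, mh, p, q, hruns, hzs, hd, h1, h2, h3⟩ := h
      subst hruns hd
      by_cases hlt : g < threshold
      · -- extend the open run
        simp only [pvRunsStep, pvAStep, hlt, if_pos, List.getLast?_concat, List.dropLast_concat,
          pvMkCur_insert_top, pvMkCur_getD_min, pvMkCur_insert_min]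
        cases run with
        | nil => simp at h1
        | cons a rest =>
          simp only [List.head?_cons, Option.some.injEq] at h1
          subst h1
          by_cases hm : g < m
          · refine ⟨rs, (b, p) :: rest ++ [(hh, g)], b, hh, g, hh, p, g, by simp, hzs, by simp [hm], by simp, ?_, ?_⟩
            · rw [show ((b, p) :: rest ++ [(hh, g)] : List (Int × Int)) = ((b, p) :: rest) ++ [(hh, g)] by simp, List.getLast?_concat]
            · rw [show ((b,p) :: rest ++ [(hh,g)] : List (Int × Int)) = ((b,p) :: rest) ++ [(hh,g)] by simp,
                pvMin_concat_some _ _ _ h3]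
              simp [hm]
          · refine ⟨rs, (b, p) :: rest ++ [(hh, g)], b, hh, m, mh, p, g, by simp, hzs, by simp [hm], by simp, ?_, ?_⟩
            · rw [show ((b, p) :: rest ++ [(hh, g)] : List (Int × Int)) = ((b, p) :: rest) ++ [(hh, g)] by simp, List.getLast?_concat]
            · rw [show ((b,p) :: rest ++ [(hh,g)] : List (Int × Int)) = ((b,p) :: rest) ++ [(hh,g)] by simp,
                pvMin_concat_some _ _ _ h3]
              simp [hm]
      · -- close the run
        simp only [pvRunsStep, pvAStep, hlt, List.getLast?_concat, decide_false, if_false,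
          Bool.true_eq_false, pvInv, pvMkCur_getD_top, pvMkCur_getD_base, pvMkCur_items_thickness]
        constructor
        · rw [pvZonesOf_concat, pvZonesOf_concat, pvZoneOf_of_inv h1 h2 h3]
          simp [hzs]
        · exact Or.inr ⟨rs ++ [(true, run)], [(hh, g)], by simp⟩
  | none =>
      obtain ⟨hzs, hshape⟩ := h
      by_cases hlt : g < threshold
      · -- open a new run
        simp only [pvAStep, hlt, if_pos]
        rcases hshape with hnil | ⟨rs, run, hruns⟩
        · subst hnil
          exact ⟨[], [(hh, g)], hh, hh, g, hh, g, g, by simp [pvRunsStep, decide_eq_true hlt],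
            by simpa [pvZonesOf] using hzs, rfl, rfl, rfl, rfl⟩
        · subst hruns
          refine ⟨rs ++ [(false, run)], [(hh, g)], hh, hh, g, hh, g, g, ?_,
            by simpa using hzs, rfl, rfl, rfl, rfl⟩
          simp [pvRunsStep, decide_eq_true hlt]
      · -- still outside a duct
        simp only [pvAStep, hlt]
        rcases hshape with hnil | ⟨rs, run, hruns⟩
        · subst hnil
          refine ⟨?_, Or.inr ⟨[], [(hh, g)], by simp [pvRunsStep, decide_eq_false hlt]⟩⟩
          simp [pvRunsStep, decide_eq_false hlt, pvZonesOf] at hzs ⊢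
          exact hzs
        · subst hruns
          have hfl : decide (g < threshold) = false := decide_eq_false hlt
          simp only [pvRunsStep, hfl, List.getLast?_concat, List.dropLast_concat]
          simp only [if_true, if_false]
          refine ⟨?_, Or.inr ⟨rs, run ++ [(hh, g)], by simp⟩⟩
          rw [pvZonesOf_concat] at hzs
          rw [pvZonesOf_concat]
          simpa using hzs
      
theorem pvMain (threshold : Int) (l : List (Int × Int)) :
    ∀ (runs : List (Bool × List (Int × Int)))
      (st : List (List (String × Int)) × Option (PySem.Dict String Int)), pvInv runs st →
      pvAFinish (l.foldl (pvAStep threshold) st) = pvZonesOf (l.foldl (pvRunsStep threshold) runs) := by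
  induction l with
  | nil => intro runs st h; exact pvFinish_inv runs st h
  | cons hg rest ih =>
      intro runs st h
      simpa using ih (pvRunsStep threshold runs hg) (pvAStep threshold st hg)
        (pvStep_inv threshold runs st hg h)

-- ===== VERDICT (by name: the statement is the Claim_ definition above) =====
theorem detect_duct_zones_spec : Claim_equal_detect_duct_zones := by
  intro gradients threshold _
  unfold Spec_detect_duct_zones detect_duct_zones detect_duct_zones_alt
  simp only [PySem.List.foldl_append_if, List.nil_append]
  exact pvMain threshold gradients [] ([], none) ⟨rfl, Or.inl rfl⟩
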